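-- pv_equiv track=rewrite | github.com/zeuzhacker1/awx_porta | local_scripts/collect-pre-update-data/libs/format.py | justify_strs_parts
-- ===== SOURCE A (Python) =====
-- def justify_strs_parts(data, separator, separator_limit=1, splitter=None):
--     """Re-aling strings by max length of parts divided by separator
--
--     Turns something like:
--         KEY_AAA: VALUE_AAA
--         KEY_BBBBBB: VALUE_BBBBBB
--     Into:
--         KEY_AAA:    VALUE_AAA
--         KEY_BBBBBB: VALUE_BBBBBB
--
--     Parameters:
--         :data (str): String(s) to re-aling.
--         :separator (str): Symbol used to divide string into parts.
--         :separator_limit (int): Maximum divisions by separator.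
--         :splitter (str|None): Multiline divider into strings.
--
--     Returns:
--         :str: Re-alingned string(s).
--     """
--     splitter = splitter or "\n"
--     elems_formatted = []
--     elems_separated = []
--     parts_widths = []
--
--     for elem in data.split(splitter):
--         elems_separated.append(elem.split(separator, separator_limit))
--         columns_widths_len = len(parts_widths)
--
--         for i in range(len(elems_separated[-1])):
--             elem_part_len = len(f"{elems_separated[-1][i]}{separator}")
--
--             if i >= columns_widths_len:
--                 parts_widths.append(elem_part_len)
--             elif parts_widths[i] < elem_part_len:
--                 parts_widths[i] = elem_part_len
--
--     for elem_parts in elems_separated: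
--         elem_parts_len = len(elem_parts)
--         elems_formatted.append("".join(
--             f"{elem_parts[i]}{separator}".ljust(parts_widths[i])
--             if i+1 < elem_parts_len
--             else elem_parts[i].ljust(parts_widths[i]).rstrip(" ")
--             for i in range(elem_parts_len)
--         ))
--
--     return splitter.join(elems_formatted).rstrip(" ")
-- ===== SOURCE B (Python) =====
-- def justify_strs_parts(data, separator, separator_limit=1, splitter=None):
--     """Column-recursive alignment: peel the first column, pad it to the column
--     width, and recurse on the row tails (no width table is ever built)."""
--     splitter = splitter or "\n"
--     rows = [line.split(separator, separator_limit) for line in data.split(splitter)]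
--     return splitter.join(_align(rows, separator)).rstrip(" ")
--
--
-- def _align(rows, separator):
--     if not any(rows):
--         return [""] * len(rows)
--     width = max(len(r[0]) + len(separator) for r in rows if r)
--     tails = _align([r[1:] if len(r) > 1 else [] for r in rows], separator)
--     return ["" if not r
--             else r[0].rstrip(" ") if len(r) == 1
--             else (r[0] + separator).ljust(width) + t
--             for r, t in zip(rows, tails)]
-- ===== Notes on version B (the rewrite author's own statement) =====
-- stated objective: alternative
-- what changed: A's two row-wise passes over a mutable parts_widths table are replaced by a column-recursive algorithm: peel the first column off every row, pad it to that single column's max width, recurse on the row tails, and stitch each line back together left-to-right - no width table is ever built.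
import Mathlib
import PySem

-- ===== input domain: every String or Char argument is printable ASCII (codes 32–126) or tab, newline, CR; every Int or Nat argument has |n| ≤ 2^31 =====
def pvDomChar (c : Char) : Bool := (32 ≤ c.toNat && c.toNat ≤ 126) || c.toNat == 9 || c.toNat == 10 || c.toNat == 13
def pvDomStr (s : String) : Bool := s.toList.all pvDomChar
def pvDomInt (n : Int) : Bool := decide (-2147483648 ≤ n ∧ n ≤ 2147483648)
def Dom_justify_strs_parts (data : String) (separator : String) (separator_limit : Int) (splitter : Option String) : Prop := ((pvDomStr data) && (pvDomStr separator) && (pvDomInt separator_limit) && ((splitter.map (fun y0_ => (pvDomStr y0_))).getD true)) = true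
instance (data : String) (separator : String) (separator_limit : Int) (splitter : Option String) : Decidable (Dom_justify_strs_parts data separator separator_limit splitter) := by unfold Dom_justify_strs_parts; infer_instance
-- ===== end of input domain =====

-- B replaces A's width-table passes by a column-recursive algorithm (peel the first column,
-- pad it, recurse on the row tails — no width table is ever built); same return value
-- wherever A returns (Pre_ excludes separator = "", where A raises ValueError).

-- shared primitive helpers (missing from PySem), exact ports of the Python built-ins:
-- s.ljust(w) with default fill (Nat subtraction clamps exactly like Python's no-op on w ≤ len)
def pyLjust (cs : List Char) (w : Nat) : List Char := cs ++ List.replicate (w - cs.length) ' '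
-- s.rstrip(" "): drop trailing space characters
def pyRstripSp (cs : List Char) : List Char := (cs.reverse.dropWhile (· == ' ')).reverse
-- `splitter or "\n"`: None and "" are falsy
def pvEffSplitter (splitter : Option String) : List Char :=
  match splitter with
  | none => ['\n']
  | some s => if s.toList = [] then ['\n'] else s.toList

-- ===== PORT A =====
-- inner `for i in range(len(elem))` loop mutating parts_widths; `n` is the STALE
-- `columns_widths_len = len(parts_widths)` captured before the loop, exactly as in A.
-- `parts_widths[i]` read: i is provably < len(parts_widths) there, so getD i 0 is exact.
def pvUpdW (sep : List Char) (pw : List Nat) (row : List (List Char)) : List Nat :=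
  (List.range row.length).foldl (fun pw2 i =>
      let l := (row.getD i []).length + sep.length
      if pw.length ≤ i then pw2 ++ [l]
      else if pw2.getD i 0 < l then pw2.set i l else pw2) pw

def justify_strs_parts (data : String) (separator : String) (separator_limit : Int) (splitter : Option String) : String :=
  let sp := pvEffSplitter splitter
  let sep := separator.toList
  -- first for-loop: builds (elems_separated, parts_widths)
  let st := (PySem.Chars.splitOn data.toList sp).foldl
      (fun (st : List (List (List Char)) × List Nat) elem =>
        let row := PySem.Chars.splitOnMax elem sep separator_limit
        (st.1 ++ [row], pvUpdW sep st.2 row)) ([], [])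
  -- second for-loop: elems_formatted (parts_widths[i]: i < len(row) ≤ len(parts_widths), getD exact)
  let fmtd := st.1.foldl (fun acc row =>
      let k := row.length
      acc ++ [PySem.Chars.join [] ((List.range k).map (fun i =>
          if i + 1 < k then pyLjust ((row.getD i []) ++ sep) (st.2.getD i 0)
          else pyRstripSp (pyLjust (row.getD i []) (st.2.getD i 0))))]) []
  String.ofList (pyRstripSp (PySem.Chars.join sp fmtd))

-- ===== PORT B =====
-- `[r[1:] if len(r) > 1 else [] for r in rows]`
def pvTailsB (rows : List (List (List Char))) : List (List (List Char)) :=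
  rows.map (fun r => if 1 < r.length then r.tail else [])

-- termination lemmas for pvAlignB (cited by its decreasing_by)
theorem pvTailsB_sum_le (rows : List (List (List Char))) :
    ((pvTailsB rows).map List.length).sum ≤ (rows.map List.length).sum := by
  induction rows with
  | nil => simp [pvTailsB]
  | cons r rs ih =>
      simp only [pvTailsB, List.map_cons, List.sum_cons] at *
      have h1 : (if 1 < r.length then r.tail else []).length ≤ r.length := by
        split_ifs <;> simp [List.length_tail]
      omega

theorem pvTailsB_sum_lt (rows : List (List (List Char)))
    (h : rows.any (fun r => !r.isEmpty) = true) :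
    ((pvTailsB rows).map List.length).sum < (rows.map List.length).sum := by
  induction rows with
  | nil => simp at h
  | cons r rs ih =>
      have hle := pvTailsB_sum_le rs
      simp only [pvTailsB, List.map_cons, List.sum_cons] at hle ⊢
      by_cases hr : r.isEmpty
      · have hr' : r = [] := List.isEmpty_iff.mp hr
        subst hr'
        have h' : rs.any (fun r => !r.isEmpty) = true := by simpa using h
        have hlt := ih h'
        simp only [pvTailsB] at hlt
        have hhead : (if 1 < ([] : List (List Char)).length
            then ([] : List (List Char)).tail else []).length = 0 := by simp
        omega
      · have hr' : r ≠ [] := fun he => hr (by simp [he])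
        have hpos : 0 < r.length := List.length_pos_iff.mpr hr'
        have h1 : (if 1 < r.length then r.tail else []).length < r.length := by
          split_ifs with h2
          · simp only [List.length_tail]; omega
          · simpa using hpos
        omega

-- recursive `_align(rows, separator)`
def pvAlignB (sep : List Char) (rows : List (List (List Char))) : List (List Char) :=
  if h : rows.any (fun r => !r.isEmpty) then
    -- `max(len(r[0]) + len(separator) for r in rows if r)` (nonempty here, so getD 0 unused)
    let width := ((rows.filterMap (fun r =>
        if r.isEmpty then none else some ((r.headD []).length + sep.length))).max?.getD 0)
    let tails := pvAlignB sep (pvTailsB rows)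
    (rows.zip tails).map (fun rt =>
      if rt.1.isEmpty then []
      else if rt.1.length = 1 then pyRstripSp (rt.1.headD [])
      else pyLjust ((rt.1.headD []) ++ sep) width ++ rt.2)
  else rows.map (fun _ => [])
termination_by (rows.map List.length).sum
decreasing_by exact pvTailsB_sum_lt rows h

def justify_strs_parts_alt (data : String) (separator : String) (separator_limit : Int) (splitter : Option String) : String :=
  let sp := pvEffSplitter splitter
  let sep := separator.toList
  let rows := (PySem.Chars.splitOn data.toList sp).map
      (fun line => PySem.Chars.splitOnMax line sep separator_limit)
  String.ofList (pyRstripSp (PySem.Chars.join sp (pvAlignB sep rows)))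

-- ===== PRECONDITION & SPEC =====
-- Pre_ excludes exactly separator = "": there Python's str.split raises ValueError("empty separator").
def Pre_justify_strs_parts (data : String) (separator : String) (separator_limit : Int) (splitter : Option String) : Prop := separator ≠ ""
instance (data : String) (separator : String) (separator_limit : Int) (splitter : Option String) : Decidable (Pre_justify_strs_parts data separator separator_limit splitter) := by unfold Pre_justify_strs_parts; infer_instance
def pvWitness_justify_strs_parts : String × String × Int × Option String := ("a:1\nbb:22", ":", 1, none)

def Spec_justify_strs_parts (data : String) (separator : String) (separator_limit : Int) (splitter : Option String) (out : String) : Prop := out = justify_strs_parts_alt data separator separator_limit splitter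
instance (data : String) (separator : String) (separator_limit : Int) (splitter : Option String) (out : String) : Decidable (Spec_justify_strs_parts data separator separator_limit splitter out) := by unfold Spec_justify_strs_parts; infer_instance

-- ===== CLAIM (what is proved, stated in full; the proofs are below) =====
def Claim_equal_justify_strs_parts : Prop := ∀ (data : String) (separator : String) (separator_limit : Int) (splitter : Option String), Dom_justify_strs_parts data separator separator_limit splitter → Pre_justify_strs_parts data separator separator_limit splitter → Spec_justify_strs_parts data separator separator_limit splitter (justify_strs_parts data separator separator_limit splitter)

-- ===== LEMMAS AND PROOFS =====

-- width of column i contributed by one row (0 when the row lacks column i)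
def pvGi (sep : List Char) (i : Nat) (row : List (List Char)) : Nat :=
  if i < row.length then (row.getD i []).length + sep.length else 0

-- the width of column i over a row set
def pvWd (sep : List Char) (rows : List (List (List Char))) (i : Nat) : Nat :=
  rows.foldl (fun a r => max a (pvGi sep i r)) 0

-- row formatter shared by both characterisations: pad every non-last part, rstrip the last
def pvG (sep : List Char) : List (List Char) → (Nat → Nat) → List Char
  | [], _ => []
  | [x], _ => pyRstripSp x
  | x :: y :: rest, w => pyLjust (x ++ sep) (w 0) ++ pvG sep (y :: rest) (fun i => w (i + 1))

-- ljust pads with spaces, so a following rstrip(" ") cancels it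
theorem pvRstrip_pad (cs : List Char) (m : Nat) :
    pyRstripSp (cs ++ List.replicate m ' ') = pyRstripSp cs := by
  simp [pyRstripSp]

theorem pvFoldl_max_init (l : List Nat) (a : Nat) :
    l.foldl max a = max a (l.foldl max 0) := by
  induction l generalizing a with
  | nil => simp
  | cons x xs ih =>
      simp only [List.foldl_cons]
      rw [ih (max a x), ih (max 0 x)]
      omega

theorem pvMaxD_cons (l : List Nat) (x : Nat) : (x :: l).max?.getD 0 = l.foldl max x := by
  induction l generalizing x with
  | nil => rfl
  | cons y ys ih =>
      have h1 : (x :: y :: ys).max?.getD 0 = ((max x y) :: ys).max?.getD 0 := by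
        simp only [List.max?_cons, Option.getD_some]
        cases h : ys.max? <;> simp <;> omega
      rw [h1, ih, List.foldl_cons]

theorem pvMaxD_eq_foldl (l : List Nat) : l.max?.getD 0 = l.foldl max 0 := by
  cases l with
  | nil => rfl
  | cons x xs => rw [pvMaxD_cons, List.foldl_cons, pvFoldl_max_init xs x,
      pvFoldl_max_init xs (max 0 x)]; omega

-- B's head-column max over the nonempty rows = pvWd at column 0
theorem pvWidth0_fold (sep : List Char) (rows : List (List (List Char))) (a : Nat) :
    (rows.filterMap (fun r =>
        if r.isEmpty then none else some ((r.headD []).length + sep.length))).foldl max a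
      = rows.foldl (fun a r => max a (pvGi sep 0 r)) a := by
  induction rows generalizing a with
  | nil => rfl
  | cons r rs ih =>
      cases r with
      | nil =>
          have hstep : (([] : List (List Char)) :: rs).filterMap (fun r =>
              if r.isEmpty then none else some ((r.headD []).length + sep.length))
              = rs.filterMap (fun r =>
              if r.isEmpty then none else some ((r.headD []).length + sep.length)) := rfl
          rw [hstep, List.foldl_cons, ih]
          congr 1
          simp [pvGi]
      | cons x xs =>
          have hstep : ((x :: xs) :: rs).filterMap (fun r =>
              if r.isEmpty then none else some ((r.headD []).length + sep.length))
              = (x.length + sep.length) :: rs.filterMap (fun r =>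
              if r.isEmpty then none else some ((r.headD []).length + sep.length)) := rfl
          rw [hstep, List.foldl_cons, List.foldl_cons, ih]
          rfl

theorem pvWidth0_eq (sep : List Char) (rows : List (List (List Char))) :
    ((rows.filterMap (fun r =>
        if r.isEmpty then none else some ((r.headD []).length + sep.length))).max?.getD 0)
      = pvWd sep rows 0 := by
  rw [pvMaxD_eq_foldl, pvWidth0_fold, pvWd]

-- peeling a column shifts pvGi by one
theorem pvGi_tail (sep : List Char) (i : Nat) (r : List (List Char)) :
    pvGi sep i (if 1 < r.length then r.tail else []) = pvGi sep (i + 1) r := by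
  by_cases h : 1 < r.length
  · rw [if_pos h]
    simp only [pvGi, List.length_tail, List.getD_eq_getElem?_getD, List.getElem?_tail]
    by_cases h2 : i + 1 < r.length
    · rw [if_pos (by omega), if_pos h2]
    · rw [if_neg (by omega), if_neg h2]
  · rw [if_neg h]
    have : ¬ i + 1 < r.length := by omega
    simp [pvGi, this]

theorem pvWd_tails (sep : List Char) (rows : List (List (List Char))) (i : Nat) :
    pvWd sep (pvTailsB rows) i = pvWd sep rows (i + 1) := by
  rw [pvWd, pvWd, pvTailsB, List.foldl_map]
  have : (fun (a : Nat) (r : List (List Char)) =>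
      max a (pvGi sep i (if 1 < r.length then r.tail else [])))
      = fun a r => max a (pvGi sep (i + 1) r) := by
    funext a r; rw [pvGi_tail]
  rw [this]

theorem pvZipMap {α β γ : Type} (l : List α) (h : α → β) (f : α × β → γ) :
    (l.zip (l.map h)).map f = l.map (fun x => f (x, h x)) := by
  induction l with
  | nil => rfl
  | cons x xs ih => simp [ih]

-- the recursive pvAlignB equals per-row formatting with the column widths pvWd
theorem pvAlignB_eq_aux (sep : List Char) :
    ∀ (n : Nat) (rows : List (List (List Char))), (rows.map List.length).sum ≤ n →
      pvAlignB sep rows = rows.map (fun r => pvG sep r (fun i => pvWd sep rows i)) := by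
  intro n
  induction n with
  | zero =>
      intro rows hle
      rw [pvAlignB]
      have hany : ¬ rows.any (fun r => !r.isEmpty) = true := by
        intro h
        have := pvTailsB_sum_lt rows h
        omega
      rw [dif_neg hany]
      apply List.map_congr_left
      intro r hr
      have h1 : r.isEmpty = true := by
        have := List.any_eq_false.mp (Bool.eq_false_iff.mpr hany) r hr
        simpa using this
      have : r = [] := List.isEmpty_iff.mp h1
      subst this
      rfl
  | succ n ih =>
      intro rows hle
      rw [pvAlignB]
      by_cases hany : rows.any (fun r => !r.isEmpty) = true
      · rw [dif_pos hany]
        have hrec : pvAlignB sep (pvTailsB rows)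
            = (pvTailsB rows).map (fun r => pvG sep r (fun i => pvWd sep (pvTailsB rows) i)) := by
          apply ih
          have := pvTailsB_sum_lt rows hany
          omega
        rw [hrec, pvTailsB, List.map_map, pvZipMap]
        apply List.map_congr_left
        intro r _
        have hw : (fun i => pvWd sep (List.map (fun r => if 1 < r.length then r.tail else []) rows) i)
            = (fun i => pvWd sep rows (i + 1)) := by
          funext i
          have := pvWd_tails sep rows i
          simpa [pvTailsB] using this
        simp only [Function.comp]
        rw [hw, pvWidth0_eq]
        match r with
        | [] => rfl
        | [x] => rfl
        | x :: y :: rest => rfl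
      · rw [dif_neg hany]
        apply List.map_congr_left
        intro r hr
        have h1 : r.isEmpty = true := by
          have := List.any_eq_false.mp (Bool.eq_false_iff.mpr hany) r hr
          simpa using this
        have : r = [] := List.isEmpty_iff.mp h1
        subst this
        rfl

theorem pvAlignB_eq (sep : List Char) (rows : List (List (List Char))) :
    pvAlignB sep rows = rows.map (fun r => pvG sep r (fun i => pvWd sep rows i)) :=
  pvAlignB_eq_aux sep _ rows (Nat.le_refl _)

-- join with empty separator peels one element
theorem pvJoinNilCons (a : List Char) (l : List (List Char)) :
    PySem.Chars.join [] (a :: l) = a ++ PySem.Chars.join [] l := by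
  cases l with
  | nil => simp [PySem.Chars.join_singleton, PySem.Chars.join_nil]
  | cons b l' => rw [PySem.Chars.join_cons_cons]; simp

-- A's per-row comprehension equals the recursive row formatter pvG
theorem pvG_eq_rowA (sep : List Char) (row : List (List Char)) (w : Nat → Nat) :
    PySem.Chars.join [] ((List.range row.length).map (fun i =>
        if i + 1 < row.length then pyLjust ((row.getD i []) ++ sep) (w i)
        else pyRstripSp (pyLjust (row.getD i []) (w i)))) = pvG sep row w := by
  induction row generalizing w with
  | nil => rfl
  | cons x xs ih =>
      cases xs with
      | nil =>
          show PySem.Chars.join [] [pyRstripSp (pyLjust x (w 0))] = pyRstripSp x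
          rw [PySem.Chars.join_singleton, pyLjust, pvRstrip_pad]
      | cons y rest =>
          have hlen : (x :: y :: rest).length = (rest.length + 1) + 1 := by simp
          rw [hlen, List.range_succ_eq_map, List.map_cons, pvJoinNilCons, List.map_map]
          have hhead : (if 0 + 1 < (rest.length + 1) + 1
              then pyLjust (((x :: y :: rest).getD 0 []) ++ sep) (w 0)
              else pyRstripSp (pyLjust ((x :: y :: rest).getD 0 []) (w 0)))
              = pyLjust (x ++ sep) (w 0) := by
            rw [if_pos (by omega)]; rfl
          have htail : ((fun i =>
              if i + 1 < (rest.length + 1) + 1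
              then pyLjust (((x :: y :: rest).getD i []) ++ sep) (w i)
              else pyRstripSp (pyLjust ((x :: y :: rest).getD i []) (w i))) ∘ Nat.succ)
              = fun i =>
              if i + 1 < (y :: rest).length
              then pyLjust (((y :: rest).getD i []) ++ sep) (w (i + 1))
              else pyRstripSp (pyLjust ((y :: rest).getD i []) (w (i + 1))) := by
            funext i
            simp only [Function.comp, List.getD_cons_succ, List.length_cons, Nat.succ_eq_add_one]
            by_cases h : i + 1 < rest.length + 1
            · rw [if_pos (by omega), if_pos h]
            · rw [if_neg (by omega), if_neg h]
          rw [hhead, htail, show (y :: rest).length = rest.length + 1 from rfl] at *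
          rw [show pvG sep (x :: y :: rest) w
              = pyLjust (x ++ sep) (w 0) ++ pvG sep (y :: rest) (fun i => w (i + 1)) from rfl]
          congr 1
          have := ih (fun i => w (i + 1))
          simpa using this

-- ===== A-side width-table characterisation (identical machinery to the port's loop) =====
theorem pvUpdW_aux (sep : List Char) (row : List (List Char)) (pw : List Nat) (j : Nat) :
    ((List.range j).foldl (fun pw2 i =>
        if pw.length ≤ i then pw2 ++ [(row[i]?.getD []).length + sep.length]
        else if pw2[i]?.getD 0 < (row[i]?.getD []).length + sep.length
          then pw2.set i ((row[i]?.getD []).length + sep.length) else pw2) pw).length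
      = max pw.length j
    ∧ ∀ i, ((List.range j).foldl (fun pw2 i =>
        if pw.length ≤ i then pw2 ++ [(row[i]?.getD []).length + sep.length]
        else if pw2[i]?.getD 0 < (row[i]?.getD []).length + sep.length
          then pw2.set i ((row[i]?.getD []).length + sep.length) else pw2) pw)[i]?.getD 0
      = if i < j then max (pw[i]?.getD 0) ((row[i]?.getD []).length + sep.length)
        else pw[i]?.getD 0 := by
  induction j with
  | zero => simp
  | succ j ih =>
      obtain ⟨hlen, hget⟩ := ih
      rw [List.range_succ, List.foldl_append]
      set F := (List.range j).foldl (fun pw2 i =>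
        if pw.length ≤ i then pw2 ++ [(row[i]?.getD []).length + sep.length]
        else if pw2[i]?.getD 0 < (row[i]?.getD []).length + sep.length
          then pw2.set i ((row[i]?.getD []).length + sep.length) else pw2) pw with hF
      simp only [List.foldl_cons, List.foldl_nil]
      by_cases h : pw.length ≤ j
      · simp only [if_pos h]
        constructor
        · simp only [List.length_append, List.length_cons, List.length_nil, hlen]; omega
        · intro i
          by_cases hij : i < j
          · rw [List.getElem?_append_left (by rw [hlen]; omega)]
            rw [hget i]
            simp [hij, Nat.lt_succ_of_lt hij]
          · by_cases hej : i = j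
            · subst hej
              rw [List.getElem?_append_right (by rw [hlen]; omega)]
              have h1 : i - F.length = 0 := by rw [hlen]; omega
              rw [h1]
              have h2 : pw[i]? = none := List.getElem?_eq_none (by omega)
              simp [h2]
            · rw [List.getElem?_eq_none
                (by simp only [List.length_append, List.length_cons, List.length_nil, hlen]; omega)]
              have h2 : pw[i]? = none := List.getElem?_eq_none (by omega)
              rw [if_neg (show ¬ i < j + 1 by omega), h2]
      · have hFlen : F.length = pw.length := by rw [hlen]; omega
        by_cases hc : F[j]?.getD 0 < (row[j]?.getD []).length + sep.length
        · simp only [if_neg h, if_pos hc]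
          constructor
          · rw [List.length_set, hlen]; omega
          · intro i
            by_cases hej : i = j
            · subst hej
              rw [List.getElem?_set_self (by omega)]
              have hFj := hget i
              rw [if_neg (by omega)] at hFj
              rw [hFj] at hc
              simp only [Option.getD_some, if_pos (show i < i + 1 by omega)]
              omega
            · rw [List.getElem?_set_ne (by omega), hget i]
              by_cases hij : i < j
              · simp [hij, Nat.lt_succ_of_lt hij]
              · rw [if_neg hij, if_neg (by omega)]
        · simp only [if_neg h, if_neg hc]
          refine ⟨by rw [hlen]; omega, fun i => ?_⟩
          rw [hget i]
          by_cases hej : i = j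
          · subst hej
            have hFj := hget i
            rw [if_neg (by omega)] at hFj
            rw [hFj] at hc
            rw [if_neg (by omega), if_pos (by omega)]
            omega
          · by_cases hij : i < j
            · simp [hij, Nat.lt_succ_of_lt hij]
            · rw [if_neg hij, if_neg (by omega)]

theorem pvUpdW_eq_aux (sep : List Char) (pw : List Nat) (row : List (List Char)) :
    pvUpdW sep pw row = (List.range row.length).foldl (fun pw2 i =>
        if pw.length ≤ i then pw2 ++ [(row[i]?.getD []).length + sep.length]
        else if pw2[i]?.getD 0 < (row[i]?.getD []).length + sep.length
          then pw2.set i ((row[i]?.getD []).length + sep.length) else pw2) pw := by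
  simp only [pvUpdW, List.getD_eq_getElem?_getD]

theorem pvUpdW_getD (sep : List Char) (pw : List Nat) (row : List (List Char)) (i : Nat) :
    (pvUpdW sep pw row).getD i 0 = max (pw.getD i 0) (pvGi sep i row) := by
  rw [pvGi]
  simp only [List.getD_eq_getElem?_getD]
  rw [pvUpdW_eq_aux, (pvUpdW_aux sep row pw row.length).2 i]
  by_cases h : i < row.length
  · simp [h]
  · have h2 : row[i]? = none := List.getElem?_eq_none (by omega)
    simp [h2, h]

-- A's parts_widths fold read at column i = pvWd
theorem pvWA_getD (sep : List Char) (rows : List (List (List Char))) (pw : List Nat) (i : Nat) :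
    (rows.foldl (pvUpdW sep) pw).getD i 0
      = rows.foldl (fun a r => max a (pvGi sep i r)) (pw.getD i 0) := by
  induction rows generalizing pw with
  | nil => rfl
  | cons r rs ih =>
      simp only [List.foldl_cons]
      rw [ih, pvUpdW_getD]

-- A's first loop: accumulating pair fold = (map, width fold)
theorem pvFoldl_pair {α β γ : Type} (f : α → β) (g : γ → β → γ)
    (l : List α) (a : List β) (b : γ) :
    l.foldl (fun st x => (st.1 ++ [f x], g st.2 (f x))) (a, b)
      = (a ++ l.map f, l.foldl (fun w x => g w (f x)) b) := by
  induction l generalizing a b with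
  | nil => simp
  | cons x xs ih => simp [ih]

-- ===== VERDICT (by name: the statement is the Claim_ definition above) =====
theorem justify_strs_parts_spec : Claim_equal_justify_strs_parts := by
  intro data separator separator_limit splitter _hdom _hpre
  unfold Spec_justify_strs_parts justify_strs_parts justify_strs_parts_alt
  dsimp only
  rw [pvFoldl_pair (fun elem => PySem.Chars.splitOnMax elem separator.toList separator_limit)
      (pvUpdW separator.toList)]
  dsimp only
  rw [List.nil_append, PySem.List.foldl_append_singleton_eq_map]
  set rows := (PySem.Chars.splitOn data.toList (pvEffSplitter splitter)).map
      (fun line => PySem.Chars.splitOnMax line separator.toList separator_limit) with hrows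
  have hfm : (PySem.Chars.splitOn data.toList (pvEffSplitter splitter)).foldl
      (fun w x => pvUpdW separator.toList w (PySem.Chars.splitOnMax x separator.toList separator_limit)) []
      = rows.foldl (pvUpdW separator.toList) [] := by
    rw [hrows, List.foldl_map]
  refine congrArg (fun x => String.ofList (pyRstripSp (PySem.Chars.join (pvEffSplitter splitter) x))) ?_
  rw [pvAlignB_eq]
  apply List.map_congr_left
  intro row _
  rw [hfm]
  have hw : (fun i => ((rows.foldl (pvUpdW separator.toList) []).getD i 0))
      = fun i => pvWd separator.toList rows i := by
    funext i
    rw [pvWA_getD]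
    rfl
  rw [← hw]
  exact pvG_eq_rowA separator.toList row _
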